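-- pv_equiv track=rewrite | github.com/tmihoc/python-libjuju | juju/url.py | extract_revision
-- ===== SOURCE A (Python) =====
-- def extract_revision(name):
--     revision = -1
--     for i in range(len(name) - 1, -1, -1):
--         c = name[i]
--         if c.isnumeric():
--             continue
--         if c == "-" and i != (len(name) - 1):
--             revision = int(name[(i + 1) :])
--             name = name[:i]
--         break
--     return (name, revision)
-- ===== SOURCE B (Python) =====
-- def extract_revision(name):
--     head, sep, tail = name.rpartition("-")
--     if sep and tail.isnumeric():
--         return (head, int(tail))
--     return (name, -1)
-- ===== Notes on version B (the rewrite author's own statement) =====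
-- stated objective: idiomatic
-- what changed: Replaced the backward index loop over the characters by a single str.rpartition split at the last hyphen followed by a numeric check of the suffix.
import Mathlib
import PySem

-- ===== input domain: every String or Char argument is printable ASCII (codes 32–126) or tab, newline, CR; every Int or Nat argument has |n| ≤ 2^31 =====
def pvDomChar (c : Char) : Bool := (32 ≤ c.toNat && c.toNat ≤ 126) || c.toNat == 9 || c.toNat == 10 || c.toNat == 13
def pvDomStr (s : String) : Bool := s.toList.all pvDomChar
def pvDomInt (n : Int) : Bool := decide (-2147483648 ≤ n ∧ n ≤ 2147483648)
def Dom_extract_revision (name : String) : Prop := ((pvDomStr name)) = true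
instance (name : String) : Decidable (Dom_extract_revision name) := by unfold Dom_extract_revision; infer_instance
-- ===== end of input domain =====

-- B replaces A's backward index loop by one rpartition split at the last hyphen plus a numeric check of
-- the suffix (idiomatic, same cost); both are proved equal on every string of the domain.
-- On the ASCII domain Python's str.isnumeric coincides with str.isdigit, so 'c.isnumeric()'
-- is ported as PySem.Chars.isdigit (exact on Dom); the int(...) calls only ever see
-- nonempty all-digit strings, so '.getD 0' on PySem.Int.ofChars? is never taken.

-- ===== PORT A =====
-- the 'for i in range(len(name)-1, -1, -1)' loop with break: structural recursion on the
-- remaining fuel (fuel = i + 1, current index i); state is the unchanged original list.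
def extract_revision_go (l : List Char) : Nat → List Char × Int
  | 0 => (l, -1)                                   -- loop exhausted: return (name, -1)
  | i + 1 =>
    let c := (PySem.List.pyGet? l (i : Int)).getD ' '   -- name[i]; i is in range by construction
    if PySem.Chars.isdigit c then extract_revision_go l i   -- c.isnumeric(): continue
    else if c = '-' ∧ (i : Int) ≠ (l.length : Int) - 1 then
      (PySem.List.slice l none (some (i : Int)),         -- name[:i]
       (PySem.Int.ofChars? (PySem.List.slice l (some ((i : Int) + 1)) none)).getD 0)  -- int(name[i+1:])
    else (l, -1)                                    -- break

def extract_revision (name : String) : String × Int :=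
  let l := name.toList
  let r := extract_revision_go l l.length
  (String.ofList r.1, r.2)

-- ===== PORT B =====
-- hand port of str.rpartition("-") (exact): split at the LAST '-' ;
-- ([], [], l) when '-' does not occur (Python's ('', '', name)).
def rpartitionDash (l : List Char) : List Char × List Char × List Char :=
  let r := l.reverse
  let tl := r.takeWhile (· ≠ '-')
  match r.dropWhile (· ≠ '-') with
  | [] => ([], [], l)
  | _ :: hd => (hd.reverse, ['-'], tl.reverse)

def extract_revision_altCore (l : List Char) : List Char × Int :=
  let p := rpartitionDash l
  if p.2.1 ≠ [] ∧ PySem.Chars.strIsdigit p.2.2 then   -- 'if sep and tail.isnumeric()'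
    (p.1, (PySem.Int.ofChars? p.2.2).getD 0)          -- (head, int(tail))
  else (l, -1)

def extract_revision_alt (name : String) : String × Int :=
  let r := extract_revision_altCore name.toList
  (String.ofList r.1, r.2)

-- ===== PRECONDITION & SPEC =====
def Spec_extract_revision (name : String) (out : String × Int) : Prop := out = extract_revision_alt name
instance (name : String) (out : String × Int) : Decidable (Spec_extract_revision name out) := by unfold Spec_extract_revision; infer_instance

-- ===== CLAIM (what is proved, stated in full; the proofs are below) =====
def Claim_equal_extract_revision : Prop := ∀ (name : String), Dom_extract_revision name → Spec_extract_revision name (extract_revision name)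

-- ===== LEMMAS AND PROOFS =====

-- A's loop, rephrased on the reversed char list: acc = already scanned suffix (in original
-- order), rs = still unscanned part, reversed; orig = the whole original list.
def pvF (orig : List Char) (acc : List Char) : List Char → List Char × Int
  | [] => (orig, -1)
  | c :: rs' =>
    if PySem.Chars.isdigit c then pvF orig (c :: acc) rs'
    else if c = '-' ∧ acc ≠ [] then (rs'.reverse, (PySem.Int.ofChars? acc).getD 0)
    else (orig, -1)

theorem pvDigit_ne_dash {c : Char} (h : PySem.Chars.isdigit c = true) : (c ≠ '-') := by
  intro hc; subst hc; simp [PySem.Chars.isdigit] at h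

theorem pvTW_all {xs ys : List Char} (h : ∀ x ∈ xs, x ≠ '-') :
    (xs ++ ys).takeWhile (· ≠ '-') = xs ++ ys.takeWhile (· ≠ '-') := by
  have h' : ∀ x ∈ xs, ((x ≠ '-') : Bool) = true := fun x hx => by simpa using h x hx
  rw [List.takeWhile_append, if_pos (by rw [List.takeWhile_eq_self_iff.mpr h'])]

theorem pvDW_all {xs ys : List Char} (h : ∀ x ∈ xs, x ≠ '-') :
    (xs ++ ys).dropWhile (· ≠ '-') = ys.dropWhile (· ≠ '-') := by
  have h' : ∀ x ∈ xs, ((x ≠ '-') : Bool) = true := fun x hx => by simpa using h x hx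
  rw [List.dropWhile_append,
    if_pos (by rw [List.dropWhile_eq_nil_iff.mpr h']; rfl)]

theorem pvGo_eq_pvF (l : List Char) : ∀ (j : Nat), j ≤ l.length →
    extract_revision_go l j = pvF l (l.drop j) ((l.take j).reverse) := by
  intro j
  induction j with
  | zero => intro _; simp [extract_revision_go, pvF]
  | succ j ih =>
    intro h
    have hj : j < l.length := by omega
    have hget : PySem.List.pyGet? l (j : Int) = some l[j] := by
      simp [List.getElem?_eq_getElem hj]
    have htake : (l.take (j+1)).reverse = l[j] :: (l.take j).reverse := by
      rw [List.take_add_one]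
      simp [List.getElem?_eq_getElem hj]
    rw [htake, extract_revision_go, hget]
    simp only [Option.getD_some]
    rw [pvF]
    by_cases hd : PySem.Chars.isdigit l[j] = true
    · rw [if_pos hd, if_pos hd, ← List.drop_eq_getElem_cons hj]
      exact ih (by omega)
    · rw [if_neg hd, if_neg hd]
      have hiff : ((j : Int) ≠ (l.length : Int) - 1) ↔ l.drop (j+1) ≠ [] := by
        simp only [ne_eq, List.drop_eq_nil_iff]
        omega
      by_cases hm : l[j] = '-'
      · by_cases hn : l.drop (j+1) = []
        · rw [if_neg (by rw [hiff]; tauto), if_neg (by tauto)]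
        · rw [if_pos ⟨hm, hiff.mpr hn⟩, if_pos ⟨hm, hn⟩]
          have h1 : PySem.List.slice l none (some (j : Int)) = l.take j := by
            simp [PySem.List.slice_to_natCast (xs := l) (b := j)]
          have h2 : PySem.List.slice l (some ((j : Int) + 1)) none = l.drop (j+1) := by
            have := PySem.List.slice_from_natCast (xs := l) (a := j + 1)
            rw [← this]; norm_num
          rw [h1, h2, List.reverse_reverse]
      · rw [if_neg (by tauto), if_neg (by tauto)]

theorem pvF_eq_altCore (rs : List Char) : ∀ acc, (∀ c ∈ acc, PySem.Chars.isdigit c) →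
    pvF (rs.reverse ++ acc) acc rs = extract_revision_altCore (rs.reverse ++ acc) := by
  induction rs with
  | nil =>
    intro acc hacc
    have hne : ∀ x ∈ acc.reverse, x ≠ '-' := by
      intro x hx; exact pvDigit_ne_dash (hacc x (List.mem_reverse.mp hx))
    have h' : ∀ x ∈ acc.reverse, ((x ≠ '-') : Bool) = true := fun x hx => by simpa using hne x hx
    simp only [List.reverse_nil, List.nil_append, pvF]
    rw [extract_revision_altCore, rpartitionDash]
    simp only [List.dropWhile_eq_nil_iff.mpr h']
    simp
  | cons c rs' ih =>
    intro acc hacc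
    have horig : (c :: rs').reverse ++ acc = rs'.reverse ++ (c :: acc) := by simp
    by_cases hd : PySem.Chars.isdigit c = true
    · have hacc' : ∀ x ∈ c :: acc, PySem.Chars.isdigit x := by
        intro x hx; rcases List.mem_cons.mp hx with rfl | hx
        · exact hd
        · exact hacc x hx
      rw [horig]
      show pvF (rs'.reverse ++ (c :: acc)) acc (c :: rs') = _
      rw [pvF, if_pos hd]
      exact ih (c :: acc) hacc'
    · have hnacc : ∀ x ∈ acc.reverse, x ≠ '-' := by
        intro x hx; exact pvDigit_ne_dash (hacc x (List.mem_reverse.mp hx))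
      rw [horig]
      show pvF (rs'.reverse ++ (c :: acc)) acc (c :: rs') = _
      rw [pvF, if_neg (by simp [hd])]
      by_cases hm : c = '-'
      · subst hm
        by_cases ha : acc = []
        · subst ha
          rw [if_neg (by simp)]
          rw [extract_revision_altCore, rpartitionDash]
          simp only [List.reverse_append, List.reverse_cons, List.reverse_nil,
            List.nil_append, List.reverse_reverse, List.singleton_append]
          simp [PySem.Chars.strIsdigit]
        · rw [if_pos ⟨rfl, ha⟩]
          rw [extract_revision_altCore, rpartitionDash]
          have hrev : (rs'.reverse ++ ('-' :: acc)).reverse = acc.reverse ++ ('-' :: rs') := by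
            simp
          rw [hrev]
          rw [pvTW_all hnacc, pvDW_all hnacc]
          simp only [List.takeWhile_cons, List.dropWhile_cons]
          have hsd : PySem.Chars.strIsdigit acc = true := by
            simp [PySem.Chars.strIsdigit, ha, List.all_eq_true.mpr fun x hx => hacc x hx]
          simp [hsd]
      · rw [if_neg (by simp [hm])]
        rw [extract_revision_altCore, rpartitionDash]
        have hrev : (rs'.reverse ++ (c :: acc)).reverse = acc.reverse ++ (c :: rs') := by simp
        rw [hrev, pvTW_all hnacc, pvDW_all hnacc]
        have htw : List.takeWhile (· ≠ '-') (c :: rs') = c :: List.takeWhile (· ≠ '-') rs' := by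
          rw [List.takeWhile_cons, if_pos (by simpa using hm)]
        have hdw : List.dropWhile (· ≠ '-') (c :: rs') = List.dropWhile (· ≠ '-') rs' := by
          rw [List.dropWhile_cons, if_pos (by simpa using hm)]
        rw [htw, hdw]
        rcases hrest : List.dropWhile (· ≠ '-') rs' with _ | ⟨x, hd2⟩
        · simp
        · have hcm : PySem.Chars.strIsdigit
              ((List.takeWhile (fun x : Char => !decide (x = '-')) rs').reverse ++ c :: acc) = false := by
            simp only [PySem.Chars.strIsdigit, Bool.and_eq_false_iff]
            right
            exact List.all_eq_false.mpr ⟨c, by simp, by simp [hd]⟩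
          simp [hcm]


-- ===== VERDICT (by name: the statement is the Claim_ definition above) =====
theorem extract_revision_spec : Claim_equal_extract_revision := by
  intro name _
  unfold Spec_extract_revision extract_revision extract_revision_alt
  have h1 := pvGo_eq_pvF name.toList name.toList.length (le_refl _)
  have h2 := pvF_eq_altCore name.toList.reverse []
    (by intro c hc; simp at hc)
  simp only [List.drop_length, List.take_length] at h1
  simp only [List.append_nil, List.reverse_reverse] at h2
  have h3 := h1.trans h2
  show (String.ofList (extract_revision_go name.toList name.toList.length).1,
        (extract_revision_go name.toList name.toList.length).2) =
       (String.ofList (extract_revision_altCore name.toList).1,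
        (extract_revision_altCore name.toList).2)
  rw [h3]
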